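-- pv_equiv track=rewrite | github.com/Py-Forge-Cli/PyForge-CLI | notebooks/testing/unit/test_volume_operations.py | _is_valid_volume_path
-- ===== SOURCE A (Python) =====
-- def _is_valid_volume_path(path):
--     """Helper method to validate volume path format"""
--     if not path or not isinstance(path, str):
--         return False
--
--     parts = path.split('/')
--     return (
--         len(parts) == 5 and
--         parts[0] == '' and
--         parts[1] == 'Volumes' and
--         all(part for part in parts[2:])  # No empty components
--     )
-- ===== SOURCE B (Python) =====
-- def _is_valid_volume_path(path):
--     if not path or not isinstance(path, str):
--         return False
--     if not path.startswith('/Volumes/'):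
--         return False
--     slashes = 0
--     prev_slash = True  # an immediate '/' would make a component empty
--     for ch in path[9:]:
--         if ch == '/':
--             if prev_slash:
--                 return False
--             slashes += 1
--             prev_slash = True
--         else:
--             prev_slash = False
--     return slashes == 2 and not prev_slash
-- ===== Notes on version B (the rewrite author's own statement) =====
-- stated objective: alternative
-- what changed: Replaced split('/') plus positional list checks by a prefix test for '/Volumes/' and a single-pass state machine over the rest that counts slashes and rejects empty components without building a parts list.
import Mathlib
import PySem

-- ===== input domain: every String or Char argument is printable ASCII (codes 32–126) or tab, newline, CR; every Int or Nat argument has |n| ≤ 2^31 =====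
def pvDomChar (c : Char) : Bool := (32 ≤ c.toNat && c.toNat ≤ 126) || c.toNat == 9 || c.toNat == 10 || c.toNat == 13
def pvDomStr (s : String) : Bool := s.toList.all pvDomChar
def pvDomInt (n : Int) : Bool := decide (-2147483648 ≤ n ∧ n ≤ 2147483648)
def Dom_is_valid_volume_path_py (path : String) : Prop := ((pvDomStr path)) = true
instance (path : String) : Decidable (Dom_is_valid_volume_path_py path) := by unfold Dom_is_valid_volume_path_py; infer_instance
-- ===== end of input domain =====

-- B replaces split('/')-and-positional-checks by a '/Volumes/' prefix test plus a one-pass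
-- slash-counting state machine (objective: alternative, same O(n) cost, no parts list built).

-- ===== PORT A =====
def is_valid_volume_path_py (path : String) : Bool :=
  if path = "" then false
  else
    let parts := PySem.Chars.splitOn path.toList "/".toList
    (parts.length == 5) &&
    (PySem.List.pyGet? parts 0 == some "".toList) &&
    (PySem.List.pyGet? parts 1 == some "Volumes".toList) &&
    ((PySem.List.slice parts (some 2) none).all (fun p => !p.isEmpty))

-- ===== PORT B =====
-- the for-loop of Source B over path[9:] with its two state variables (early `return False` = false)
def pvBLoop : List Char → Nat → Bool → Bool
  | [], slashes, prevSlash => slashes == 2 && !prevSlash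
  | c :: rest, slashes, prevSlash =>
    if c = '/' then
      if prevSlash then false else pvBLoop rest (slashes + 1) true
    else pvBLoop rest slashes false

def is_valid_volume_path_py_alt (path : String) : Bool :=
  if path = "" then false
  else if !(PySem.Chars.startswith path.toList "/Volumes/".toList) then false
  else pvBLoop (PySem.Chars.slice path.toList (some 9) none) 0 true

-- ===== PRECONDITION & SPEC =====
def Spec_is_valid_volume_path_py (path : String) (out : Bool) : Prop := out = is_valid_volume_path_py_alt path
instance (path : String) (out : Bool) : Decidable (Spec_is_valid_volume_path_py path out) := by unfold Spec_is_valid_volume_path_py; infer_instance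

-- ===== CLAIM (what is proved, stated in full; the proofs are below) =====
def Claim_equal_is_valid_volume_path_py : Prop := ∀ (path : String), Dom_is_valid_volume_path_py path → Spec_is_valid_volume_path_py path (is_valid_volume_path_py path)

-- ===== LEMMAS AND PROOFS =====

-- proof-side model of splitting on a single '/'
def pvConsH (p : List Char) : List (List Char) → List (List Char)
  | [] => [p]
  | x :: xs => (p ++ x) :: xs

def pvSplit1 : List Char → List (List Char)
  | [] => [[]]
  | c :: r => if c = '/' then [] :: pvSplit1 r else pvConsH [c] (pvSplit1 r)

def pvJoin : List (List Char) → List Char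
  | [] => []
  | [x] => x
  | x :: y :: xs => x ++ '/' :: pvJoin (y :: xs)

theorem pvSplit1_ne_nil : ∀ l, pvSplit1 l ≠ []
  | [] => by simp [pvSplit1]
  | c :: r => by
    simp only [pvSplit1]
    split
    · simp
    · cases h : pvSplit1 r <;> simp [pvConsH]

theorem pvConsH_consH (p q : List Char) (ps : List (List Char)) :
    pvConsH p (pvConsH q ps) = pvConsH (p ++ q) ps := by
  cases ps <;> simp [pvConsH]

theorem pvGo (fuel : Nat) : ∀ (l cur : List Char) (acc : List (List Char)), l.length < fuel →
    PySem.Chars.splitOn.go ['/'] fuel l cur acc = acc.reverse ++ pvConsH cur.reverse (pvSplit1 l) := by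
  induction fuel with
  | zero => intro l cur acc h; omega
  | succ n ih =>
    intro l cur acc h
    match l with
    | [] => simp [PySem.Chars.splitOn.go, pvSplit1, pvConsH]
    | c :: rest =>
      by_cases hc : c = '/'
      · subst hc
        have hstep : PySem.Chars.splitOn.go ['/'] (n+1) ('/'::rest) cur acc
            = PySem.Chars.splitOn.go ['/'] n rest [] (cur.reverse :: acc) := by
          simp [PySem.Chars.splitOn.go]
        rw [hstep, ih rest [] _ (by simp at h; omega)]
        cases hsr : pvSplit1 rest with
        | nil => exact absurd hsr (pvSplit1_ne_nil rest)
        | cons x xs => simp [pvSplit1, pvConsH, hsr]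
      · have hstep : PySem.Chars.splitOn.go ['/'] (n+1) (c::rest) cur acc
            = PySem.Chars.splitOn.go ['/'] n rest (c :: cur) acc := by
          simp [PySem.Chars.splitOn.go, List.isPrefixOf]
          exact fun hc' => absurd hc'.symm hc
        rw [hstep, ih rest (c :: cur) acc (by simp at h; omega)]
        simp [pvSplit1, if_neg hc, pvConsH_consH]

theorem pvSplitOn_slash (l : List Char) : PySem.Chars.splitOn l ['/'] = pvSplit1 l := by
  unfold PySem.Chars.splitOn
  rw [pvGo (l.length + 1) l [] [] (by omega)]
  cases h : pvSplit1 l with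
  | nil => exact absurd h (pvSplit1_ne_nil l)
  | cons x xs => simp [pvConsH]

theorem pvBLoop_iff : ∀ (l : List Char) (s : Nat) (prev : Bool),
    pvBLoop l s prev = true ↔
      (s + (pvSplit1 l).length = 3 ∧
        ∀ p ∈ (if prev then pvSplit1 l else (pvSplit1 l).tail), p ≠ ([] : List Char)) := by
  intro l
  induction l with
  | nil =>
    intro s prev
    cases prev <;> simp [pvBLoop, pvSplit1]
  | cons c rest ih =>
    intro s prev
    by_cases hc : c = '/'
    · subst hc
      cases prev
      · have hstep : pvBLoop ('/'::rest) s false = pvBLoop rest (s+1) true := by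
          simp [pvBLoop]
        rw [hstep, ih (s+1) true]
        simp [pvSplit1]
        intro _
        omega
      · have hstep : pvBLoop ('/'::rest) s true = false := by simp [pvBLoop]
        rw [hstep]
        simp [pvSplit1]
    · cases hsr : pvSplit1 rest with
      | nil => exact absurd hsr (pvSplit1_ne_nil rest)
      | cons x xs =>
        have hstep : ∀ prev', pvBLoop (c::rest) s prev' = pvBLoop rest s false := by
          intro prev'; simp [pvBLoop, if_neg hc]
        have h1 := ih s false
        rw [hsr] at h1
        simp at h1
        cases prev <;> rw [hstep, h1] <;> simp [pvSplit1, if_neg hc, hsr, pvConsH]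

theorem pvBLoop_true_iff (l : List Char) (s : Nat) :
    pvBLoop l s true = true ↔
      (s + (pvSplit1 l).length = 3 ∧ ∀ p ∈ pvSplit1 l, p ≠ ([] : List Char)) := by
  rw [pvBLoop_iff]
  simp

theorem pvSplit1_no_slash : ∀ (l : List Char), ∀ p ∈ pvSplit1 l, '/' ∉ p
  | [] => by simp [pvSplit1]
  | c :: r => by
    intro p hp
    by_cases hc : c = '/'
    · subst hc
      simp [pvSplit1] at hp
      rcases hp with h | h
      · simp [h]
      · exact pvSplit1_no_slash r p h
    · simp only [pvSplit1, if_neg hc] at hp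
      cases hsr : pvSplit1 r with
      | nil => exact absurd hsr (pvSplit1_ne_nil r)
      | cons x xs =>
        rw [hsr] at hp
        simp only [pvConsH, List.mem_cons] at hp
        rcases hp with h | h
        · subst h
          intro hm
          simp only [List.cons_append, List.nil_append, List.mem_cons] at hm
          rcases hm with h | h
          · exact hc h.symm
          · exact pvSplit1_no_slash r x (by rw [hsr]; simp) h
        · exact pvSplit1_no_slash r p (by rw [hsr]; simp [h])

theorem pvJoin_split1 : ∀ l, pvJoin (pvSplit1 l) = l
  | [] => by simp [pvSplit1, pvJoin]
  | c :: r => by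
    have ihr := pvJoin_split1 r
    by_cases hc : c = '/'
    · subst hc
      cases hsr : pvSplit1 r with
      | nil => exact absurd hsr (pvSplit1_ne_nil r)
      | cons x xs =>
        rw [hsr] at ihr
        simp [pvSplit1, pvJoin, hsr, ihr]
    · cases hsr : pvSplit1 r with
      | nil => exact absurd hsr (pvSplit1_ne_nil r)
      | cons x xs =>
        rw [hsr] at ihr
        cases xs with
        | nil =>
          simp only [pvSplit1, if_neg hc, hsr, pvConsH, pvJoin] at *
          simp [ihr]
        | cons y ys =>
          simp only [pvSplit1, if_neg hc, hsr, pvConsH, pvJoin] at *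
          simp [ihr]

theorem pvSplit1_pre (rest : List Char) :
    pvSplit1 ("/Volumes/".toList ++ rest) = [] :: "Volumes".toList :: pvSplit1 rest := by
  show pvSplit1 ('/'::'V'::'o'::'l'::'u'::'m'::'e'::'s'::'/'::rest) = _
  cases hsr : pvSplit1 rest with
  | nil => exact absurd hsr (pvSplit1_ne_nil rest)
  | cons x xs => simp [pvSplit1, pvConsH, hsr]

theorem pvA_iff (path : String) : is_valid_volume_path_py path = true ↔
    ∃ a b c : List Char,
      pvSplit1 path.toList = [[], "Volumes".toList, a, b, c] ∧ a ≠ [] ∧ b ≠ [] ∧ c ≠ [] := by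
  unfold is_valid_volume_path_py
  by_cases hp : path = ""
  · subst hp
    rw [if_pos rfl]
    simp only [Bool.false_eq_true, false_iff]
    rintro ⟨a, b, c, h, -⟩
    have : (pvSplit1 "".toList).length = 5 := by rw [h]; rfl
    simp [pvSplit1] at this
  · rw [if_neg hp]
    have hsep : "/".toList = ['/'] := rfl
    rw [hsep, pvSplitOn_slash]
    constructor
    · intro h
      simp only [Bool.and_eq_true, beq_iff_eq, List.all_eq_true] at h
      obtain ⟨⟨⟨h5, h0⟩, h1⟩, h2⟩ := h
      rcases hP : pvSplit1 path.toList with _ | ⟨p0, _ | ⟨p1, _ | ⟨p2, _ | ⟨p3, _ | ⟨p4, tl⟩⟩⟩⟩⟩ <;>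
        rw [hP] at h5 h0 h1 h2 <;> simp at h5
      have htl : tl = [] := by simpa using h5
      subst htl
      have h0' : p0 = [] := by simpa [PySem.List.pyGet?, PySem.List.pyIdx?] using h0
      have h1' : p1 = "Volumes".toList := by
        simpa [PySem.List.pyGet?, PySem.List.pyIdx?] using h1
      have hdrop : PySem.List.slice [p0,p1,p2,p3,p4] (some 2) none = [p2,p3,p4] := by
        rw [show ((2:Int)) = ((2:Nat):Int) by rfl, PySem.List.slice_from_natCast]
        rfl
      rw [hdrop] at h2
      have h2' : ∀ q ∈ [p2, p3, p4], q ≠ ([] : List Char) := by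
        intro q hq
        have := h2 q hq
        simpa using this
      exact ⟨p2, p3, p4, by rw [h0', h1'], h2' p2 (by simp), h2' p3 (by simp),
        h2' p4 (by simp)⟩
    · rintro ⟨a, b, c, h, ha, hb, hc⟩
      rw [h]
      simp [PySem.List.pyGet?, PySem.List.pyIdx?]
      rw [show ((2:Int)) = ((2:Nat):Int) by rfl, PySem.List.slice_from_natCast]
      simp [ha, hb, hc]

theorem pvB_iff (path : String) : is_valid_volume_path_py_alt path = true ↔
    ∃ a b c : List Char,
      pvSplit1 path.toList = [[], "Volumes".toList, a, b, c] ∧ a ≠ [] ∧ b ≠ [] ∧ c ≠ [] := by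
  unfold is_valid_volume_path_py_alt
  by_cases hp : path = ""
  · subst hp
    rw [if_pos rfl]
    simp only [Bool.false_eq_true, false_iff]
    rintro ⟨a, b, c, h, -⟩
    have : (pvSplit1 "".toList).length = 5 := by rw [h]; rfl
    simp [pvSplit1] at this
  · rw [if_neg hp]
    by_cases hS : PySem.Chars.startswith path.toList "/Volumes/".toList = true
    · obtain ⟨rest, hrest⟩ : ∃ rest, path.toList = "/Volumes/".toList ++ rest := by
        obtain ⟨t, ht⟩ := (PySem.Chars.startswith_iff _ _).1 hS
        exact ⟨t, ht.symm⟩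
      have hslice : PySem.Chars.slice path.toList (some 9) none = rest := by
        rw [PySem.Chars.slice_eq_listSlice,
          show ((9:Int)) = ((9:Nat):Int) by rfl, PySem.List.slice_from_natCast, hrest,
          show (9:Nat) = ("/Volumes/".toList).length by rfl, List.drop_left]
      rw [hS, if_neg (by simp), hslice, pvBLoop_true_iff, hrest, pvSplit1_pre]
      simp only [Nat.zero_add]
      constructor
      · rintro ⟨h3, hne⟩
        rcases hR : pvSplit1 rest with _ | ⟨a, _ | ⟨b, _ | ⟨c, _ | ⟨d, tl⟩⟩⟩⟩ <;>
          rw [hR] at h3 hne <;> simp at h3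
        refine ⟨a, b, c, rfl, ?_, ?_, ?_⟩
        · exact hne a (by simp)
        · exact hne b (by simp)
        · exact hne c (by simp)
      · rintro ⟨a, b, c, h, ha, hb, hc⟩
        have hR : pvSplit1 rest = [a, b, c] := by
          simpa using h
        rw [hR]
        refine ⟨by simp, ?_⟩
        intro p hp'
        simp only [List.mem_cons, List.not_mem_nil, or_false] at hp'
        rcases hp' with h' | h' | h' <;> subst h' <;> assumption
    · simp only [Bool.not_eq_true] at hS
      rw [hS, if_pos (by simp)]
      simp only [Bool.false_eq_true, false_iff]
      rintro ⟨a, b, c, h, -⟩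
      have hcs : path.toList = "/Volumes/".toList ++ (a ++ '/' :: (b ++ '/' :: c)) := by
        have hj := pvJoin_split1 path.toList
        rw [h] at hj
        rw [← hj]
        rfl
      have hS' : PySem.Chars.startswith path.toList "/Volumes/".toList = true :=
        (PySem.Chars.startswith_iff _ _).2 ⟨_, hcs.symm⟩
      rw [hS] at hS'
      exact absurd hS' (by simp)

-- ===== VERDICT (by name: the statement is the Claim_ definition above) =====
theorem is_valid_volume_path_py_spec : Claim_equal_is_valid_volume_path_py := by
  intro path _
  unfold Spec_is_valid_volume_path_py
  rw [Bool.eq_iff_iff, pvA_iff, pvB_iff]
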